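-- pv_equiv track=rewrite | github.com/Sefaria/Sefaria-Project | sefaria/helper/normalization.py | convert_normalized_indices_to_unnormalized_indices
-- ===== SOURCE A (Python) =====
-- from bisect import bisect_right
--
-- def convert_normalized_indices_to_unnormalized_indices(normalized_indices, removal_map, reverse=False):
--     """
--     normalized_indices - list of tuples where each tuple is (x, y) x being start index, y is end index + 1
--     removal_map - return value of get_mapping_after_normalization()
--     reverse - if True, normalized_indices are actually unnormalized indices and removal_map was calculated using reverse=True in get_mapping_after_normalization()
--     """
--     removal_keys = sorted(removal_map.keys())
--     unnormalized_indices = []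
--     sign = -1 if reverse else 1
--     for start, end in normalized_indices:
--         unnorm_start_index = bisect_right(removal_keys, start) - 1
--         # special case if range is zero-length. treat end as literal and not off-by-one.
--         bisect_end_index = end if end == start else (end - 1)
--         unnorm_end_index = bisect_right(removal_keys, bisect_end_index) - 1
--
--         unnorm_start = start if unnorm_start_index < 0 else start + (sign * removal_map[removal_keys[unnorm_start_index]])
--         unnorm_end = end if unnorm_end_index < 0 else end + (sign * removal_map[removal_keys[unnorm_end_index]])
--         unnormalized_indices += [(unnorm_start, unnorm_end)]
--     return unnormalized_indices
-- ===== SOURCE B (Python) =====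
-- def convert_normalized_indices_to_unnormalized_indices(normalized_indices, removal_map, reverse=False):
--     sign = -1 if reverse else 1
--     items = list(removal_map.items())
--
--     def shift(lookup, base):
--         hits = [kv for kv in items if kv[0] <= lookup]
--         if not hits:
--             return base
--         return base + sign * max(hits, key=lambda kv: kv[0])[1]
--
--     return [(shift(s, s), shift(e if e == s else e - 1, e))
--             for s, e in normalized_indices]
-- ===== Notes on version B (the rewrite author's own statement) =====
-- stated objective: alternative
-- what changed: B drops the sorted-key list and bisect_right entirely: for each query endpoint it filters the removal items to keys <= the lookup point and applies the offset of the max-key hit (a linear filter+max scan instead of sort plus binary search).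
import Mathlib
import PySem

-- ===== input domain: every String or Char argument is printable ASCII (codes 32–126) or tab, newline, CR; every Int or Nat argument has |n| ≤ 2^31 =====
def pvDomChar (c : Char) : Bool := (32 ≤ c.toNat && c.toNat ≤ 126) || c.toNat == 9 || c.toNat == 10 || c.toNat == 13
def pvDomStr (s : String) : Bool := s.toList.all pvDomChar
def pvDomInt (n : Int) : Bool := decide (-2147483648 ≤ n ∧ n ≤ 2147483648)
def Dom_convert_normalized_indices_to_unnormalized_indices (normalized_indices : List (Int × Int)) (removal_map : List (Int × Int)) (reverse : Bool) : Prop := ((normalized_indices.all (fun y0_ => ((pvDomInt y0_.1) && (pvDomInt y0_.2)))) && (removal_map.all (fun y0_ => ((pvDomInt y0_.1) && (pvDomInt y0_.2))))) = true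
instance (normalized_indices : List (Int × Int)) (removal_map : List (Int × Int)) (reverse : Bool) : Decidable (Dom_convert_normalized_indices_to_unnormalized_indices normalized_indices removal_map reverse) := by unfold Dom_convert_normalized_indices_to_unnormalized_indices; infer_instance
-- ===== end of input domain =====

-- ===== PORT A =====
-- B replaces sorted-keys + bisect_right with a per-endpoint filter+max scan over the removal items; alternative decomposition, same results.
def convert_normalized_indices_to_unnormalized_indices (normalized_indices : List (Int × Int)) (removal_map : List (Int × Int)) (reverse : Bool) : List (Int × Int) :=
  let d := PySem.Dict.ofList removal_map
  let removal_keys := PySem.List.sorted d.keys (fun k => k) false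
  let sign : Int := if reverse then -1 else 1
  normalized_indices.foldl (fun acc se =>
    let start := se.1
    let end_ := se.2
    let unnorm_start_index : Int := (PySem.List.bisectRight removal_keys start : Int) - 1
    -- special case if range is zero-length. treat end as literal and not off-by-one.
    let bisect_end_index : Int := if end_ = start then end_ else end_ - 1
    let unnorm_end_index : Int := (PySem.List.bisectRight removal_keys bisect_end_index : Int) - 1
    -- index and dict lookup are always in range / present when the branch is taken; .getD defaults are unreachable
    let unnorm_start : Int := if unnorm_start_index < 0 then start
      else start + sign * d.getD ((PySem.List.pyGet? removal_keys unnorm_start_index).getD 0) 0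
    let unnorm_end : Int := if unnorm_end_index < 0 then end_
      else end_ + sign * d.getD ((PySem.List.pyGet? removal_keys unnorm_end_index).getD 0) 0
    acc ++ [(unnorm_start, unnorm_end)]) []

-- ===== PORT B =====
-- shift(lookup, base) of Source B: filter the items to keys <= lookup, apply the offset of the max-key hit
def pvShift (items : List (Int × Int)) (sign lookup base : Int) : Int :=
  let hits := items.filter (fun kv => decide (kv.1 ≤ lookup))
  match PySem.List.max? hits (fun kv => kv.1) with
  | none => base
  | some m => base + sign * m.2

def convert_normalized_indices_to_unnormalized_indices_alt (normalized_indices : List (Int × Int)) (removal_map : List (Int × Int)) (reverse : Bool) : List (Int × Int) :=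
  let sign : Int := if reverse then -1 else 1
  let items := (PySem.Dict.ofList removal_map).items
  normalized_indices.map (fun se =>
    (pvShift items sign se.1 se.1,
     pvShift items sign (if se.2 = se.1 then se.2 else se.2 - 1) se.2))

-- ===== PRECONDITION & SPEC =====
def Spec_convert_normalized_indices_to_unnormalized_indices (normalized_indices : List (Int × Int)) (removal_map : List (Int × Int)) (reverse : Bool) (out : List (Int × Int)) : Prop := out = convert_normalized_indices_to_unnormalized_indices_alt normalized_indices removal_map reverse
instance (normalized_indices : List (Int × Int)) (removal_map : List (Int × Int)) (reverse : Bool) (out : List (Int × Int)) : Decidable (Spec_convert_normalized_indices_to_unnormalized_indices normalized_indices removal_map reverse out) := by unfold Spec_convert_normalized_indices_to_unnormalized_indices; infer_instance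

-- ===== CLAIM (what is proved, stated in full; the proofs are below) =====
def Claim_equal_convert_normalized_indices_to_unnormalized_indices : Prop := ∀ (normalized_indices : List (Int × Int)) (removal_map : List (Int × Int)) (reverse : Bool), Dom_convert_normalized_indices_to_unnormalized_indices normalized_indices removal_map reverse → Spec_convert_normalized_indices_to_unnormalized_indices normalized_indices removal_map reverse (convert_normalized_indices_to_unnormalized_indices normalized_indices removal_map reverse)

-- ===== LEMMAS AND PROOFS =====

-- Core: A's bisect-indexed adjustment of `base` at lookup point `v` equals B's pvShift on the dict's items.
lemma shift_eq (d : PySem.Dict Int Int) (hnd : d.keys.Nodup) (sign v base : Int) :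
    (let K := PySem.List.sorted d.keys (fun k => k) false
     let i : Int := (PySem.List.bisectRight K v : Int) - 1
     if i < 0 then base
     else base + sign * d.getD ((PySem.List.pyGet? K i).getD 0) 0)
    = pvShift d.items sign v base := by
  simp only []
  set K := PySem.List.sorted d.keys (fun k => k) false with hK
  have hperm : K.Perm d.keys := PySem.List.sorted_perm d.keys (fun k => k) false
  have hpw : K.Pairwise (· ≤ ·) := PySem.List.sorted_pairwise d.keys (fun k => k)
  obtain ⟨hle, hlo, hhi⟩ := PySem.List.bisectRight_spec K v hpw
  have hitems := PySem.Dict.items_eq_map_keys d hnd (0 : Int)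
  cases hi : PySem.List.bisectRight K v with
  | zero =>
    -- every key exceeds v: both sides return base
    have hempty : d.items.filter (fun kv => decide (kv.1 ≤ v)) = [] := by
      rw [List.filter_eq_nil_iff]
      intro kv hkv
      have hk : kv.1 ∈ K := (hperm.mem_iff).mpr (PySem.Dict.mem_keys_of_mem_items d hkv)
      obtain ⟨j, hj, hjk⟩ := List.mem_iff_getElem.mp hk
      have : v < K[j] := hhi j hj (by omega)
      simp only [decide_eq_true_eq]
      omega
    simp only [pvShift, hempty]
    rw [(PySem.List.max?_eq_none_iff ([] : List (Int × Int)) (fun kv => kv.1)).mpr rfl]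
    norm_num
  | succ i' =>
    have hi'len : i' < K.length := by omega
    have hkle : K[i'] ≤ v := hlo i' hi'len (by omega)
    -- K[i'] is the maximum key ≤ v
    have hmax : ∀ j, (hj : j < K.length) → K[j] ≤ v → K[j] ≤ K[i'] := by
      intro j hj hjv
      by_cases hji : j ≤ i'
      · exact PySem.List.sorted_id_getElem_mono d.keys hji hi'len
      · exact absurd (hhi j hj (by omega)) (by omega)
    -- A side reduces to base + sign * d.getD K[i'] 0
    have hA : (if (((i' + 1 : Nat) : Int) - 1) < 0 then base
        else base + sign * d.getD ((PySem.List.pyGet? K (((i' + 1 : Nat) : Int) - 1)).getD 0) 0)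
        = base + sign * d.getD K[i'] 0 := by
      have h1 : ((i' + 1 : Nat) : Int) - 1 = (i' : Int) := by push_cast; ring
      rw [h1, if_neg (by omega), PySem.List.pyGet?_natCast, List.getElem?_eq_getElem hi'len]
      rfl
    rw [hA]
    -- B side: the max-key hit is (K[i'], d.getD K[i'] 0)
    have hmemK : (K[i'], d.getD K[i'] 0) ∈ d.items := by
      rw [hitems]
      exact List.mem_map.mpr ⟨K[i'], (hperm.mem_iff).mp (List.getElem_mem hi'len), rfl⟩
    have hmemhits : (K[i'], d.getD K[i'] 0) ∈ d.items.filter (fun kv => decide (kv.1 ≤ v)) :=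
      List.mem_filter.mpr ⟨hmemK, by simpa using hkle⟩
    cases hm : PySem.List.max? (d.items.filter (fun kv => decide (kv.1 ≤ v))) (fun kv => kv.1) with
    | none =>
      rw [PySem.List.max?_eq_none_iff] at hm
      rw [hm] at hmemhits
      exact absurd hmemhits (List.not_mem_nil)
    | some m =>
      have hmhits := PySem.List.max?_mem hm
      obtain ⟨hmitems, hmle⟩ := List.mem_filter.mp hmhits
      have hmlev : m.1 ≤ v := by simpa using hmle
      -- m.1 ≤ K[i']
      have hm1 : m.1 ∈ K := (hperm.mem_iff).mpr (PySem.Dict.mem_keys_of_mem_items d hmitems)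
      obtain ⟨j, hj, hjk⟩ := List.mem_iff_getElem.mp hm1
      have hub : m.1 ≤ K[i'] := hjk ▸ hmax j hj (hjk ▸ hmlev)
      have hlb : K[i'] ≤ m.1 := PySem.List.max?_isMax hm _ hmemhits
      have hkey : m.1 = K[i'] := le_antisymm hub hlb
      -- m's value is the dict value at its key
      obtain ⟨k, hkmem, hkeq⟩ := List.mem_map.mp (hitems ▸ hmitems)
      have hval : m.2 = d.getD K[i'] 0 := by
        have h1 : m.1 = k := by rw [← hkeq]
        have h2 : m.2 = d.getD k 0 := by rw [← hkeq]
        rw [h2, ← h1, hkey]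
      simp only [pvShift, hm, hval]
  
-- per-element equality of the two loop bodies
lemma body_eq (removal_map : List (Int × Int)) (reverse : Bool) (se : Int × Int) :
    (let d := PySem.Dict.ofList removal_map
     let K := PySem.List.sorted d.keys (fun k => k) false
     let sign : Int := if reverse then -1 else 1
     let usi : Int := (PySem.List.bisectRight K se.1 : Int) - 1
     let bei : Int := if se.2 = se.1 then se.2 else se.2 - 1
     let uei : Int := (PySem.List.bisectRight K bei : Int) - 1
     ((if usi < 0 then se.1 else se.1 + sign * d.getD ((PySem.List.pyGet? K usi).getD 0) 0),
      (if uei < 0 then se.2 else se.2 + sign * d.getD ((PySem.List.pyGet? K uei).getD 0) 0)))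
    = (pvShift (PySem.Dict.ofList removal_map).items (if reverse then -1 else 1) se.1 se.1,
       pvShift (PySem.Dict.ofList removal_map).items (if reverse then -1 else 1) (if se.2 = se.1 then se.2 else se.2 - 1) se.2) := by
  have hnd := PySem.Dict.nodup_keys_ofList removal_map
  refine Prod.ext ?_ ?_
  · exact shift_eq (PySem.Dict.ofList removal_map) hnd _ se.1 se.1
  · exact shift_eq (PySem.Dict.ofList removal_map) hnd _ _ se.2

-- ===== VERDICT (by name: the statement is the Claim_ definition above) =====
theorem convert_normalized_indices_to_unnormalized_indices_spec : Claim_equal_convert_normalized_indices_to_unnormalized_indices := by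
  intro normalized_indices removal_map reverse _
  unfold Spec_convert_normalized_indices_to_unnormalized_indices
  unfold convert_normalized_indices_to_unnormalized_indices convert_normalized_indices_to_unnormalized_indices_alt
  simp only []
  rw [PySem.List.foldl_append_singleton_eq_map, List.nil_append]
  exact List.map_congr_left (fun se _ => body_eq removal_map reverse se)
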